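-- pv_equiv track=rewrite | github.com/xyres137/codegrind | leetcode_128.py | get_consecutive_subsequences
-- ===== SOURCE A (Python) =====
-- from typing import List, Dict, Set
--
-- def get_consecutive_subsequences(nums: List[int]) -> Dict[int, int]:
--     bases = {}
--     peaks = {}
--
--     processed = set()
--
--     for num in nums:
--         if num in processed:
--             continue
--
--         processed.add(num)
--
--         # Consider adding it as a peak.
--         if num - 1 in peaks.keys():
--             # num - 1 is a peak, and peaks[num - 1] is the corresponding base
--             b = peaks[num - 1]
--             bases[b] = num
--             peaks[num] = b
--
--             del peaks[num - 1]
--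
--             # Maybe merge.
--             if num + 1 in bases.keys():
--                 bases[peaks[num]] = bases[num + 1]
--                 peaks[bases[num + 1]] = peaks[num]
--
--                 del bases[num + 1]
--
--         elif num + 1 in bases.keys():
--             # num + 1 is a base. bases[num + 1] is the corresponding peak
--             p = bases[num + 1]
--             bases[num] = p
--             peaks[p] = num
--
--             del bases[num + 1]
--
--         # Else add it as base/peak.
--         else:
--             bases[num] = num
--             peaks[num] = num
--
--     return bases
-- ===== SOURCE B (Python) =====
-- from typing import List, Dict
--
-- def get_consecutive_subsequences(nums: List[int]) -> Dict[int, int]: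
--     s = set(nums)
--     res = {}
--     for num in nums:
--         # only run starts (num-1 absent) produce entries; skip duplicates
--         if num - 1 in s or num in res:
--             continue
--         end = num
--         while end + 1 in s:
--             end += 1
--         res[num] = end
--     return res
-- ===== Notes on version B (the rewrite author's own statement) =====
-- stated objective: simpler
-- what changed: Replaces A's incremental two-dict interval merging (bases/peaks with merge-on-arrival bookkeeping) by a membership set plus a scan-up from each run start, building the base-to-peak dict directly in first-occurrence order.
import Mathlib
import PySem

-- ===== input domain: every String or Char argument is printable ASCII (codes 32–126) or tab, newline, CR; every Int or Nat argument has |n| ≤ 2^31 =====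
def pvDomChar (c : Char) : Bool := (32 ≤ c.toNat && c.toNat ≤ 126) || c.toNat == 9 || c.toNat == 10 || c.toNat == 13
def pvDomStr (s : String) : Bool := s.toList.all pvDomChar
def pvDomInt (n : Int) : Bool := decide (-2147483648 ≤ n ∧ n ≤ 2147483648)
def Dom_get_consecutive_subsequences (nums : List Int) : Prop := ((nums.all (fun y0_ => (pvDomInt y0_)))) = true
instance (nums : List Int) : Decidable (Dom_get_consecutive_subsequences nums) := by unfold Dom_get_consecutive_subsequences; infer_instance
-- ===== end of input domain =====

-- B is a different algorithm with the same exact behaviour (including dict order): a membership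
-- set plus a scan-up from each run start, instead of A's incremental two-dict interval merging.

-- ===== PORT A =====
-- Python state: (bases, peaks, processed); one loop body = pvAStep, transliterated branch for branch.
def pvAStep (st : PySem.Dict Int Int × PySem.Dict Int Int × PySem.Set Int) (num : Int) :
    PySem.Dict Int Int × PySem.Dict Int Int × PySem.Set Int :=
  match st with
  | (bases, peaks, processed) =>
    if processed.contains num then (bases, peaks, processed)
    else
      let processed := processed.add num
      match peaks.get? (num - 1) with
      | some b =>
          -- num - 1 is a peak, and peaks[num - 1] is the corresponding base
          let bases := bases.insert b num
          let peaks := (peaks.insert num b).erase (num - 1)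
          match bases.get? (num + 1) with
          | some q =>
              -- maybe merge: bases[peaks[num]] = bases[num+1]; peaks[bases[num+1]] = peaks[num]; del bases[num+1]
              let bases := bases.insert (peaks.getD num 0) q    -- peaks[num] is present here (just inserted)
              let peaks := peaks.insert q (peaks.getD num 0)
              (bases.erase (num + 1), peaks, processed)
          | none => (bases, peaks, processed)
      | none =>
          match bases.get? (num + 1) with
          | some p =>
              -- num + 1 is a base. bases[num + 1] is the corresponding peak
              ((bases.insert num p).erase (num + 1), peaks.insert p num, processed)
          | none =>
              (bases.insert num num, peaks.insert num num, processed)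

def get_consecutive_subsequences (nums : List Int) : List (Int × Int) :=
  (nums.foldl pvAStep (PySem.Dict.empty, PySem.Dict.empty, PySem.Set.empty)).1.items

-- ===== PORT B =====
-- 'end = num; while end + 1 in s: end += 1' — fuel (the set's size) only makes the loop
-- structurally terminating; it is never exhausted before the while-condition fails.
def pvClimb (s : List Int) (e : Int) : Nat → Int
  | 0 => e
  | f + 1 => if s.contains (e + 1) then pvClimb s (e + 1) f else e

def get_consecutive_subsequences_alt (nums : List Int) : List (Int × Int) :=
  let s := PySem.Set.ofList nums
  (nums.foldl (fun res num =>
      if s.contains (num - 1) || res.contains num then res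
      else res.insert num (pvClimb s num s.length)) PySem.Dict.empty).items

-- ===== PRECONDITION & SPEC =====
def Spec_get_consecutive_subsequences (nums : List Int) (out : List (Int × Int)) : Prop := out = get_consecutive_subsequences_alt nums
instance (nums : List Int) (out : List (Int × Int)) : Decidable (Spec_get_consecutive_subsequences nums out) := by unfold Spec_get_consecutive_subsequences; infer_instance

-- ===== CLAIM (what is proved, stated in full; the proofs are below) =====
def Claim_equal_get_consecutive_subsequences : Prop := ∀ (nums : List Int), Dom_get_consecutive_subsequences nums → Spec_get_consecutive_subsequences nums (get_consecutive_subsequences nums)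

-- ===== LEMMAS AND PROOFS =====

-- proof-side mirror of pvClimb, downward (describes A's 'peaks' values)
def pvFall (s : List Int) (e : Int) : Nat → Int
  | 0 => e
  | f + 1 => if s.contains (e - 1) then pvFall s (e - 1) f else e

-- m is the top (resp. bottom) of the run of consecutive members of l that e belongs to
def pvUp (l : List Int) (e m : Int) : Prop :=
  e ≤ m ∧ (∀ y, e < y → y ≤ m → y ∈ l) ∧ (m + 1) ∉ l
def pvDn (l : List Int) (e m : Int) : Prop :=
  m ≤ e ∧ (∀ y, m ≤ y → y < e → y ∈ l) ∧ (m - 1) ∉ l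

theorem pvUp_unique {l : List Int} {e m m' : Int} (h : pvUp l e m) (h' : pvUp l e m') : m = m' := by
  obtain ⟨h1, h2, h3⟩ := h; obtain ⟨h1', h2', h3'⟩ := h'
  by_contra hne
  rcases lt_or_gt_of_ne hne with hlt | hlt
  · exact h3 (h2' (m + 1) (by omega) (by omega))
  · exact h3' (h2 (m' + 1) (by omega) (by omega))

theorem pvDn_unique {l : List Int} {e m m' : Int} (h : pvDn l e m) (h' : pvDn l e m') : m = m' := by
  obtain ⟨h1, h2, h3⟩ := h; obtain ⟨h1', h2', h3'⟩ := h'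
  by_contra hne
  rcases lt_or_gt_of_ne hne with hlt | hlt
  · exact h3' (h2 (m' - 1) (by omega) (by omega))
  · exact h3 (h2' (m - 1) (by omega) (by omega))

theorem pvUp_transfer {l l' : List Int} {e m : Int} (hsub : ∀ y, y ∈ l → y ∈ l')
    (hstop : (m + 1) ∉ l') (h : pvUp l e m) : pvUp l' e m :=
  ⟨h.1, fun y hy1 hy2 => hsub y (h.2.1 y hy1 hy2), hstop⟩

theorem pvDn_transfer {l l' : List Int} {e m : Int} (hsub : ∀ y, y ∈ l → y ∈ l')
    (hstop : (m - 1) ∉ l') (h : pvDn l e m) : pvDn l' e m :=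
  ⟨h.1, fun y hy1 hy2 => hsub y (h.2.1 y hy1 hy2), hstop⟩

theorem pvUp_top_mem {l : List Int} {e m : Int} (h : pvUp l e m) (he : e ∈ l) : m ∈ l := by
  rcases eq_or_lt_of_le h.1 with rfl | hlt
  · exact he
  · exact h.2.1 m hlt le_rfl

theorem pvDn_bot_mem {l : List Int} {e m : Int} (h : pvDn l e m) (he : e ∈ l) : m ∈ l := by
  rcases eq_or_lt_of_le h.1 with rfl | hlt
  · exact he
  · exact h.2.1 m le_rfl hlt

theorem pvClimb_le (l : List Int) (e : Int) (f : Nat) : e ≤ pvClimb l e f := by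
  induction f generalizing e with
  | zero => simp [pvClimb]
  | succ f ih =>
    simp only [pvClimb]
    split
    · exact le_trans (by omega) (ih (e + 1))
    · exact le_rfl

theorem pvClimb_mem (l : List Int) (e : Int) (f : Nat) :
    ∀ y, e < y → y ≤ pvClimb l e f → y ∈ l := by
  induction f generalizing e with
  | zero => intro y h1 h2; simp only [pvClimb] at h2; omega
  | succ f ih =>
    intro y h1 h2
    simp only [pvClimb] at h2
    split at h2
    · rename_i hc
      rcases eq_or_lt_of_le (show e + 1 ≤ y by omega) with rfl | hlt
      · simpa using hc
      · exact ih (e + 1) y hlt h2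
    · omega

theorem pvClimb_stop (l : List Int) (e : Int) (f : Nat)
    (hf : ((l.filter (fun y => decide (e < y))).dedup).length ≤ f) :
    (pvClimb l e f + 1) ∉ l := by
  induction f generalizing e with
  | zero =>
    intro hmem
    simp only [pvClimb] at hmem
    have h1 : e + 1 ∈ (l.filter (fun y => decide (e < y))).dedup := by
      simp [List.mem_dedup, List.mem_filter, hmem]
    have := List.length_pos_of_mem h1
    omega
  | succ f ih =>
    simp only [pvClimb]
    split
    · rename_i hc
      have hmem : e + 1 ∈ l := by simpa using hc
      apply ih (e + 1)
      -- strict decrease: (e+1) :: dedup(filter (e+1 < ·)) is nodup and ⊆ dedup(filter (e < ·))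
      have hnd : ((e + 1) :: (l.filter (fun y => decide (e + 1 < y))).dedup).Nodup := by
        rw [List.nodup_cons]
        refine ⟨?_, List.nodup_dedup _⟩
        intro hmem'
        rw [List.mem_dedup, List.mem_filter] at hmem'
        have := of_decide_eq_true hmem'.2
        omega
      have hsub : ((e + 1) :: (l.filter (fun y => decide (e + 1 < y))).dedup) ⊆
          (l.filter (fun y => decide (e < y))).dedup := by
        intro a ha
        rcases List.mem_cons.mp ha with rfl | ha
        · simp [List.mem_dedup, List.mem_filter, hmem]
        · rw [List.mem_dedup, List.mem_filter] at ha ⊢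
          refine ⟨ha.1, ?_⟩
          have := of_decide_eq_true ha.2
          simp; omega
      have := List.Subperm.length_le (List.subperm_of_subset hnd hsub)
      simp at this
      omega
    · rename_i hc
      intro hmem
      exact hc (by simpa using hmem)

theorem pvUp_climb (l : List Int) (e : Int) (f : Nat) (hf : l.length ≤ f) :
    pvUp l e (pvClimb l e f) := by
  refine ⟨pvClimb_le l e f, pvClimb_mem l e f, pvClimb_stop l e f ?_⟩
  calc ((l.filter (fun y => decide (e < y))).dedup).length
      ≤ (l.filter (fun y => decide (e < y))).length := (List.dedup_sublist _).length_le
    _ ≤ l.length := List.length_filter_le _ _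
    _ ≤ f := hf

theorem pvFall_le (l : List Int) (e : Int) (f : Nat) : pvFall l e f ≤ e := by
  induction f generalizing e with
  | zero => simp [pvFall]
  | succ f ih =>
    simp only [pvFall]
    split
    · exact le_trans (ih (e - 1)) (by omega)
    · exact le_rfl

theorem pvFall_mem (l : List Int) (e : Int) (f : Nat) :
    ∀ y, pvFall l e f ≤ y → y < e → y ∈ l := by
  induction f generalizing e with
  | zero => intro y h1 h2; simp only [pvFall] at h1; omega
  | succ f ih =>
    intro y h1 h2
    simp only [pvFall] at h1
    split at h1
    · rename_i hc
      rcases eq_or_lt_of_le (show y ≤ e - 1 by omega) with rfl | hlt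
      · simpa using hc
      · exact ih (e - 1) y h1 (by omega)
    · omega

theorem pvFall_stop (l : List Int) (e : Int) (f : Nat)
    (hf : ((l.filter (fun y => decide (y < e))).dedup).length ≤ f) :
    (pvFall l e f - 1) ∉ l := by
  induction f generalizing e with
  | zero =>
    intro hmem
    simp only [pvFall] at hmem
    have h1 : e - 1 ∈ (l.filter (fun y => decide (y < e))).dedup := by
      rw [List.mem_dedup, List.mem_filter]
      exact ⟨hmem, by simp⟩
    have := List.length_pos_of_mem h1
    omega
  | succ f ih =>
    simp only [pvFall]
    split
    · rename_i hc
      have hmem : e - 1 ∈ l := by simpa using hc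
      apply ih (e - 1)
      have hnd : ((e - 1) :: (l.filter (fun y => decide (y < e - 1))).dedup).Nodup := by
        rw [List.nodup_cons]
        refine ⟨?_, List.nodup_dedup _⟩
        intro hmem'
        rw [List.mem_dedup, List.mem_filter] at hmem'
        have := of_decide_eq_true hmem'.2
        omega
      have hsub : ((e - 1) :: (l.filter (fun y => decide (y < e - 1))).dedup) ⊆
          (l.filter (fun y => decide (y < e))).dedup := by
        intro a ha
        rcases List.mem_cons.mp ha with rfl | ha
        · rw [List.mem_dedup, List.mem_filter]
          exact ⟨hmem, by simp⟩
        · rw [List.mem_dedup, List.mem_filter] at ha ⊢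
          refine ⟨ha.1, ?_⟩
          have := of_decide_eq_true ha.2
          simp; omega
      have := List.Subperm.length_le (List.subperm_of_subset hnd hsub)
      simp at this
      omega
    · rename_i hc
      intro hmem
      exact hc (by simpa using hmem)

theorem pvDn_fall (l : List Int) (e : Int) (f : Nat) (hf : l.length ≤ f) :
    pvDn l e (pvFall l e f) := by
  refine ⟨pvFall_le l e f, pvFall_mem l e f, pvFall_stop l e f ?_⟩
  calc ((l.filter (fun y => decide (y < e))).dedup).length
      ≤ (l.filter (fun y => decide (y < e))).length := (List.dedup_sublist _).length_le
    _ ≤ l.length := List.length_filter_le _ _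
    _ ≤ f := hf

theorem pvClimb_eq_of_up {l : List Int} {e m : Int} (h : pvUp l e m) :
    pvClimb l e l.length = m :=
  pvUp_unique (pvUp_climb l e l.length le_rfl) h

theorem pvFall_eq_of_dn {l : List Int} {e m : Int} (h : pvDn l e m) :
    pvFall l e l.length = m :=
  pvDn_unique (pvDn_fall l e l.length le_rfl) h

-- the association-list shape of 'bases' : keys are an ordered dedup filtered by p, values v
def pvRep (D : List Int) (p : Int → Bool) (v : Int → Int) : List (Int × Int) :=
  (D.filter p).map (fun b => (b, v b))

theorem pvRep_find? (D : List Int) (p : Int → Bool) (v : Int → Int) (k : Int) (hD : D.Nodup) :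
    (pvRep D p v).find? (fun q => q.1 == k) =
      if decide (k ∈ D) && p k then some (k, v k) else none := by
  induction D with
  | nil => simp [pvRep]
  | cons a D ih =>
    rw [List.nodup_cons] at hD
    by_cases hak : a = k
    · subst hak
      by_cases hp : p a
      · simp [pvRep, hp]
      · simp only [pvRep, List.filter_cons]
        rw [if_neg (by simp [hp])]
        have := ih hD.2
        simp only [pvRep] at this
        rw [this]
        simp [hD.1, hp]
    · simp only [pvRep, List.filter_cons]
      have htail := ih hD.2
      simp only [pvRep] at htail
      by_cases hp : p a
      · rw [if_pos (by simp [hp]), List.map_cons, List.find?_cons_of_neg (by simp [hak]), htail]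
        simp [Ne.symm hak]
      · rw [if_neg (by simp [hp]), htail]
        simp [Ne.symm hak]

theorem pvRep_get? (d : PySem.Dict Int Int) (D : List Int) (p : Int → Bool) (v : Int → Int)
    (k : Int) (hD : D.Nodup) (h : d.items = pvRep D p v) :
    d.get? k = if decide (k ∈ D) && p k then some (v k) else none := by
  show ((d.items.find? (fun q => q.1 == k)).map (fun x => x.2)) = _
  rw [h, pvRep_find? D p v k hD]
  split <;> simp

theorem pvRep_contains (d : PySem.Dict Int Int) (D : List Int) (p : Int → Bool) (v : Int → Int)
    (k : Int) (hD : D.Nodup) (h : d.items = pvRep D p v) :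
    d.contains k = (decide (k ∈ D) && p k) := by
  rw [PySem.Dict.contains_eq_isSome_get?, pvRep_get? d D p v k hD h]
  split <;> simp_all

theorem pvRep_insert_mem (d : PySem.Dict Int Int) (D : List Int) (p : Int → Bool) (v : Int → Int)
    (k x : Int) (hD : D.Nodup) (h : d.items = pvRep D p v)
    (hk : (decide (k ∈ D) && p k) = true) :
    (d.insert k x).items = pvRep D p (fun c => if c = k then x else v c) := by
  rw [PySem.Dict.items_insert_of_contains _ _ (by rw [pvRep_contains d D p v k hD h]; exact hk), h]
  simp only [pvRep, List.map_map]
  apply List.map_congr_left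
  intro b _
  by_cases hbk : b = k <;> simp [hbk]

theorem pvRep_insert_fresh (d : PySem.Dict Int Int) (D : List Int) (p : Int → Bool) (v : Int → Int)
    (k x : Int) (hD : D.Nodup) (h : d.items = pvRep D p v)
    (hk : (decide (k ∈ D) && p k) = false) :
    (d.insert k x).items = pvRep D p v ++ [(k, x)] := by
  rw [PySem.Dict.items_insert_of_not_contains _ _ (by rw [pvRep_contains d D p v k hD h]; exact hk), h]

theorem pvRep_filter_ne (D : List Int) (p : Int → Bool) (v : Int → Int) (k : Int) :
    (pvRep D p v).filter (fun q => !(q.1 == k)) = pvRep D (fun c => p c && !(c == k)) v := by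
  simp only [pvRep, List.filter_map, List.filter_filter]
  congr 1
  apply List.filter_congr
  intro a _
  simp only [Function.comp]
  exact Bool.and_comm _ _

theorem pvRep_erase (d : PySem.Dict Int Int) (D : List Int) (p : Int → Bool) (v : Int → Int)
    (k : Int) (h : d.items = pvRep D p v) :
    (d.erase k).items = pvRep D (fun c => p c && !(c == k)) v := by
  show d.items.filter (fun q => !(q.1 == k)) = _
  rw [h, pvRep_filter_ne]

theorem pvItems_erase (d : PySem.Dict Int Int) (k : Int) :
    (d.erase k).items = d.items.filter (fun q => !(q.1 == k)) := rfl
theorem pvRep_congr (D : List Int) (p p' : Int → Bool) (v v' : Int → Int)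
    (hp : ∀ c ∈ D, p c = p' c) (hv : ∀ c ∈ D, p c = true → v c = v' c) :
    pvRep D p v = pvRep D p' v' := by
  unfold pvRep
  rw [← List.filter_congr hp]
  apply List.map_congr_left
  intro b hb
  rw [List.mem_filter] at hb
  rw [hv b hb.1 hb.2]

theorem pvRep_append_singleton (D : List Int) (p : Int → Bool) (v : Int → Int) (a : Int) :
    pvRep (D ++ [a]) p v = pvRep D p v ++ (if p a then [(a, v a)] else []) := by
  unfold pvRep
  rw [List.filter_append, List.map_append]
  by_cases hp : p a <;> simp [hp]

theorem pvGet?_erase (d : PySem.Dict Int Int) (k k' : Int) :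
    (d.erase k).get? k' = if k' = k then none else d.get? k' := by
  show ((List.filter (fun q => !(q.1 == k)) d.items).find? (fun q => q.1 == k')).map (fun x => x.2)
      = if k' = k then none else (d.items.find? (fun q => q.1 == k')).map (fun x => x.2)
  induction d.items with
  | nil => split <;> simp
  | cons a l ih =>
    by_cases hak : a.1 = k
    · rw [List.filter_cons_of_neg (by simp [hak])]
      by_cases hk' : k' = k
      · simpa [hk'] using ih
      · rw [show List.find? (fun (q : Int × Int) => q.1 == k') (a :: l) =
              List.find? (fun (q : Int × Int) => q.1 == k') l from
            List.find?_cons_of_neg (by simp [hak]; omega)]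
        simpa [hk'] using ih
    · rw [List.filter_cons_of_pos (by simp [hak])]
      by_cases hak' : a.1 = k'
      · simp [List.find?_cons_of_pos, hak', if_neg (show ¬ k' = k by omega)]
      · rw [List.find?_cons_of_neg (by simp [hak']), List.find?_cons_of_neg (by simp [hak'])]
        exact ih

theorem pvOfList_append_singleton (pre : List Int) (num : Int) (h : num ∉ pre) :
    PySem.Set.ofList (pre ++ [num]) = PySem.Set.ofList pre ++ [num] := by
  rw [PySem.Set.ofList_eq_foldl, List.foldl_append, ← PySem.Set.ofList_eq_foldl]
  show PySem.Set.add _ num = _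
  unfold PySem.Set.add
  rw [if_neg]
  simp only [PySem.Set.contains]
  intro hc
  exact h (PySem.Set.mem_ofList pre num |>.mp (by simpa using hc))

theorem pvOfList_append_singleton_mem (pre : List Int) (num : Int) (h : num ∈ pre) :
    PySem.Set.ofList (pre ++ [num]) = PySem.Set.ofList pre := by
  rw [PySem.Set.ofList_eq_foldl, List.foldl_append, ← PySem.Set.ofList_eq_foldl]
  show PySem.Set.add _ num = _
  unfold PySem.Set.add
  rw [if_pos]
  simp only [PySem.Set.contains]
  simpa using (PySem.Set.mem_ofList pre num).mpr h

-- the invariant of A's loop over a processed prefix 'pre'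
def pvP (pre : List Int) (b : Int) : Bool := !(decide ((b - 1) ∈ pre))
def pvV (pre : List Int) (b : Int) : Int := pvClimb pre b pre.length

def pvInv (pre : List Int) (st : PySem.Dict Int Int × PySem.Dict Int Int × PySem.Set Int) : Prop :=
  st.2.2 = PySem.Set.ofList pre ∧
  st.1.items = pvRep (PySem.Set.ofList pre) (pvP pre) (pvV pre) ∧
  ∀ x : Int, (x + 1) ∉ pre →
    st.2.1.get? x = if decide (x ∈ pre) then some (pvFall pre x pre.length) else none

-- B's loop invariant
def pvBInv (nums pre : List Int) (res : PySem.Dict Int Int) : Prop :=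
  res.items = pvRep (PySem.Set.ofList pre) (pvP nums)
      (fun b => pvClimb (PySem.Set.ofList nums) b (PySem.Set.ofList nums).length)

theorem pvSetContains_iff (l : List Int) (x : Int) :
    (PySem.Set.ofList l).contains x = true ↔ x ∈ l := by
  simp only [PySem.Set.contains, List.contains_iff_mem]
  exact PySem.Set.mem_ofList l x

-- extending the processed set by a number not adjacent to a run top/bottom keeps pvClimb/pvFall
theorem pvV_congr (l l' : List Int) (hmem : ∀ y, y ∈ l ↔ y ∈ l') (b : Int) :
    pvClimb l b l.length = pvClimb l' b l'.length := by
  have h1 := pvUp_climb l b l.length le_rfl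
  have h2 : pvUp l' b (pvClimb l b l.length) :=
    pvUp_transfer (fun y hy => (hmem y).mp hy) (fun hy => h1.2.2 ((hmem _).mpr hy)) h1
  exact (pvClimb_eq_of_up h2).symm

theorem pvFall_congr (l l' : List Int) (hmem : ∀ y, y ∈ l ↔ y ∈ l') (b : Int) :
    pvFall l b l.length = pvFall l' b l'.length := by
  have h1 := pvDn_fall l b l.length le_rfl
  have h2 : pvDn l' b (pvFall l b l.length) :=
    pvDn_transfer (fun y hy => (hmem y).mp hy) (fun hy => h1.2.2 ((hmem _).mpr hy)) h1
  exact (pvFall_eq_of_dn h2).symm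

theorem pvV_extend (pre : List Int) (num c : Int) (hc : c ∈ pre)
    (hne : pvV pre c ≠ num - 1) : pvV (pre ++ [num]) c = pvV pre c := by
  have h1 := pvUp_climb pre c pre.length le_rfl
  have htop : pvV pre c ∈ pre := pvUp_top_mem h1 hc
  have h2 : pvUp (pre ++ [num]) c (pvV pre c) := by
    refine pvUp_transfer (fun y hy => List.mem_append_left _ hy) ?_ h1
    intro hy
    rcases List.mem_append.mp hy with hy | hy
    · exact h1.2.2 hy
    · simp at hy; omega
  exact pvClimb_eq_of_up h2

theorem pvFall_extend (pre : List Int) (num x : Int) (hx : x ∈ pre)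
    (hne : pvFall pre x pre.length ≠ num + 1) :
    pvFall (pre ++ [num]) x (pre ++ [num]).length = pvFall pre x pre.length := by
  have h1 := pvDn_fall pre x pre.length le_rfl
  have hbot : pvFall pre x pre.length ∈ pre := pvDn_bot_mem h1 hx
  have h2 : pvDn (pre ++ [num]) x (pvFall pre x pre.length) := by
    refine pvDn_transfer (fun y hy => List.mem_append_left _ hy) ?_ h1
    intro hy
    rcases List.mem_append.mp hy with hy | hy
    · exact h1.2.2 hy
    · simp at hy; omega
  exact pvFall_eq_of_dn h2

theorem pvP_append (pre : List Int) (num c : Int) :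
    pvP (pre ++ [num]) c = (pvP pre c && !(c == num + 1)) := by
  have he : (c - 1 = num) ↔ (c = num + 1) := by omega
  simp only [pvP, List.mem_append, List.mem_singleton, he]
  by_cases h1 : (c - 1) ∈ pre <;> by_cases h2 : c = num + 1 <;> simp [h1, h2]

theorem pvP_same (pre : List Int) (num c : Int) (hc : c ∈ pre) (hp1 : (num + 1) ∉ pre) :
    pvP pre c = pvP (pre ++ [num]) c := by
  rw [pvP_append]
  have : ¬(c == num + 1) = true := by simp; intro h; exact hp1 (h ▸ hc)
  simp [this]

theorem pvNotMemApp {pre : List Int} {num y : Int} (h1 : y ∉ pre) (h2 : y ≠ num) :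
    y ∉ pre ++ [num] := by
  intro hy
  rcases List.mem_append.mp hy with hy | hy
  · exact h1 hy
  · exact h2 (by simpa using hy)

theorem pvMemApp {pre : List Int} {num y : Int} (h : y ∈ pre) : y ∈ pre ++ [num] :=
  List.mem_append_left _ h

theorem pvMemAppR {pre : List Int} {num : Int} : num ∈ pre ++ [num] := by simp

-- no existing run top sits at num-1 when num-1 is unprocessed
theorem pvV_ne_of_not_mem (pre : List Int) (num c : Int) (hm1 : (num - 1) ∉ pre)
    (hc : c ∈ pre) : pvV pre c ≠ num - 1 := by
  intro h
  exact hm1 (h ▸ pvUp_top_mem (pvUp_climb pre c pre.length le_rfl) hc)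

-- a run bottom other than b := fall(num-1) has its top away from num-1
theorem pvV_ne_of_ne_fall (pre : List Int) (num c : Int) (hm1 : (num - 1) ∈ pre)
    (hc : c ∈ pre) (hcp : (c - 1) ∉ pre) (hcb : c ≠ pvFall pre (num - 1) pre.length) :
    pvV pre c ≠ num - 1 := by
  intro h
  have hUc := pvUp_climb pre c pre.length le_rfl
  rw [show pvClimb pre c pre.length = pvV pre c from rfl, h] at hUc
  have hdn : pvDn pre (num - 1) c := by
    refine ⟨hUc.1, fun y h1 h2 => ?_, hcp⟩
    rcases eq_or_lt_of_le h1 with rfl | hlt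
    · exact hc
    · exact hUc.2.1 y hlt (by omega)
  exact hcb (pvDn_unique hdn (pvDn_fall pre (num - 1) pre.length le_rfl))

theorem pvFall_ne_of_not_mem (pre : List Int) (num x : Int) (hp1 : (num + 1) ∉ pre)
    (hx : x ∈ pre) : pvFall pre x pre.length ≠ num + 1 := by
  intro h
  exact hp1 (h ▸ pvDn_bot_mem (pvDn_fall pre x pre.length le_rfl) hx)

theorem pvFall_ne_of_ne_top (pre : List Int) (num x : Int) (hp1 : (num + 1) ∈ pre)
    (hx : x ∈ pre) (hstop : (x + 1) ∉ pre) (hxP : x ≠ pvV pre (num + 1)) :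
    pvFall pre x pre.length ≠ num + 1 := by
  intro h
  have hDx := pvDn_fall pre x pre.length le_rfl
  rw [h] at hDx
  have hup : pvUp pre (num + 1) x := by
    refine ⟨hDx.1, fun y h1 h2 => ?_, hstop⟩
    rcases eq_or_lt_of_le h2 with rfl | hlt
    · exact hx
    · exact hDx.2.1 y (by omega) hlt
  exact hxP (pvUp_unique hup (pvUp_climb pre (num + 1) pre.length le_rfl))

-- tops of runs in pre ++ [num], one lemma per shape
theorem pvVnum_new (pre : List Int) (num : Int) (hp1 : (num + 1) ∉ pre) :
    pvV (pre ++ [num]) num = num :=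
  pvClimb_eq_of_up ⟨le_rfl, fun y h1 h2 => absurd h2 (by omega), pvNotMemApp hp1 (by omega)⟩

theorem pvVnum_join (pre : List Int) (num : Int) (hp1 : (num + 1) ∈ pre) :
    pvV (pre ++ [num]) num = pvV pre (num + 1) := by
  have hUpP : pvUp pre (num + 1) (pvV pre (num + 1)) := pvUp_climb pre (num + 1) pre.length le_rfl
  apply pvClimb_eq_of_up
  refine ⟨by have := hUpP.1; omega, fun y h1 h2 => ?_, pvNotMemApp hUpP.2.2 (by have := hUpP.1; omega)⟩
  rcases eq_or_lt_of_le (show num + 1 ≤ y by omega) with rfl | hlt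
  · exact pvMemApp hp1
  · exact pvMemApp (hUpP.2.1 y hlt h2)

theorem pvVb_ext (pre : List Int) (num : Int) (hm1 : (num - 1) ∈ pre) (hp1 : (num + 1) ∉ pre) :
    pvV (pre ++ [num]) (pvFall pre (num - 1) pre.length) = num := by
  have hDnb := pvDn_fall pre (num - 1) pre.length le_rfl
  apply pvClimb_eq_of_up
  refine ⟨by have := hDnb.1; omega, fun y h1 h2 => ?_, pvNotMemApp hp1 (by omega)⟩
  rcases eq_or_lt_of_le h2 with rfl | hlt
  · exact pvMemAppR
  · rcases eq_or_lt_of_le (show y ≤ num - 1 by omega) with rfl | hlt2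
    · exact pvMemApp hm1
    · exact pvMemApp (hDnb.2.1 y (by omega) (by omega))

theorem pvVb_join (pre : List Int) (num : Int) (hm1 : (num - 1) ∈ pre) (hp1 : (num + 1) ∈ pre) :
    pvV (pre ++ [num]) (pvFall pre (num - 1) pre.length) = pvV pre (num + 1) := by
  have hDnb := pvDn_fall pre (num - 1) pre.length le_rfl
  have hUpP : pvUp pre (num + 1) (pvV pre (num + 1)) := pvUp_climb pre (num + 1) pre.length le_rfl
  apply pvClimb_eq_of_up
  refine ⟨by have := hDnb.1; have := hUpP.1; omega, fun y h1 h2 => ?_,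
    pvNotMemApp hUpP.2.2 (by have := hUpP.1; omega)⟩
  by_cases hy1 : y ≤ num - 1
  · rcases eq_or_lt_of_le hy1 with rfl | hlt2
    · exact pvMemApp hm1
    · exact pvMemApp (hDnb.2.1 y (by omega) (by omega))
  · by_cases hy2 : y = num
    · exact hy2 ▸ pvMemAppR
    · rcases eq_or_lt_of_le (show num + 1 ≤ y by omega) with rfl | hlt
      · exact pvMemApp hp1
      · exact pvMemApp (hUpP.2.1 y hlt h2)

-- bottoms of runs in pre ++ [num]
theorem pvFnum_new (pre : List Int) (num : Int) (hm1 : (num - 1) ∉ pre) :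
    pvFall (pre ++ [num]) num (pre ++ [num]).length = num :=
  pvFall_eq_of_dn ⟨le_rfl, fun y h1 h2 => absurd h2 (by omega), pvNotMemApp hm1 (by omega)⟩

theorem pvFnum_ext (pre : List Int) (num : Int) (hm1 : (num - 1) ∈ pre) :
    pvFall (pre ++ [num]) num (pre ++ [num]).length = pvFall pre (num - 1) pre.length := by
  have hDnb := pvDn_fall pre (num - 1) pre.length le_rfl
  apply pvFall_eq_of_dn
  refine ⟨by have := hDnb.1; omega, fun y h1 h2 => ?_,
    pvNotMemApp hDnb.2.2 (by have := hDnb.1; omega)⟩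
  rcases eq_or_lt_of_le (show y ≤ num - 1 by omega) with rfl | hlt
  · exact pvMemApp hm1
  · exact pvMemApp (hDnb.2.1 y h1 (by omega))

theorem pvFP_join (pre : List Int) (num : Int) (hm1 : (num - 1) ∉ pre) (hp1 : (num + 1) ∈ pre) :
    pvFall (pre ++ [num]) (pvV pre (num + 1)) (pre ++ [num]).length = num := by
  have hUpP : pvUp pre (num + 1) (pvV pre (num + 1)) := pvUp_climb pre (num + 1) pre.length le_rfl
  apply pvFall_eq_of_dn
  refine ⟨by have := hUpP.1; omega, fun y h1 h2 => ?_, pvNotMemApp hm1 (by omega)⟩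
  rcases eq_or_lt_of_le h1 with rfl | hlt
  · exact pvMemAppR
  · rcases eq_or_lt_of_le (show num + 1 ≤ y by omega) with rfl | hlt2
    · exact pvMemApp hp1
    · exact pvMemApp (hUpP.2.1 y hlt2 (by omega))

theorem pvFP_join' (pre : List Int) (num : Int) (hm1 : (num - 1) ∈ pre) (hp1 : (num + 1) ∈ pre) :
    pvFall (pre ++ [num]) (pvV pre (num + 1)) (pre ++ [num]).length =
      pvFall pre (num - 1) pre.length := by
  have hDnb := pvDn_fall pre (num - 1) pre.length le_rfl
  have hUpP : pvUp pre (num + 1) (pvV pre (num + 1)) := pvUp_climb pre (num + 1) pre.length le_rfl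
  apply pvFall_eq_of_dn
  refine ⟨by have := hDnb.1; have := hUpP.1; omega, fun y h1 h2 => ?_,
    pvNotMemApp hDnb.2.2 (by have := hDnb.1; omega)⟩
  by_cases hy1 : y ≤ num - 1
  · rcases eq_or_lt_of_le hy1 with rfl | hlt2
    · exact pvMemApp hm1
    · exact pvMemApp (hDnb.2.1 y h1 (by omega))
  · by_cases hy2 : y = num
    · exact hy2 ▸ pvMemAppR
    · rcases eq_or_lt_of_le (show num + 1 ≤ y by omega) with rfl | hlt
      · exact pvMemApp hp1
      · exact pvMemApp (hUpP.2.1 y hlt (by omega))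

theorem pvAStep_inv (pre : List Int) (st : PySem.Dict Int Int × PySem.Dict Int Int × PySem.Set Int)
    (num : Int) (h : pvInv pre st) : pvInv (pre ++ [num]) (pvAStep st num) := by
  obtain ⟨bases, peaks, processed⟩ := st
  obtain ⟨hproc, hbases, hpeaks⟩ := h
  dsimp only at hproc hbases hpeaks
  have hD : (PySem.Set.ofList pre).Nodup := PySem.Set.nodup_ofList pre
  by_cases hnum : num ∈ pre
  · -- already processed: state unchanged, membership unchanged
    have hc : processed.contains num = true := by
      rw [hproc]; exact (pvSetContains_iff pre num).mpr hnum
    have hiff : ∀ y : Int, y ∈ pre ++ [num] ↔ y ∈ pre := by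
      intro y
      constructor
      · intro hy
        rcases List.mem_append.mp hy with hy | hy
        · exact hy
        · have := List.mem_singleton.mp hy; subst this; exact hnum
      · exact fun hy => pvMemApp hy
    have hstep : pvAStep (bases, peaks, processed) num = (bases, peaks, processed) := by
      simp only [pvAStep, hc, if_true]
    rw [hstep]
    refine ⟨?_, ?_, ?_⟩
    · rw [pvOfList_append_singleton_mem pre num hnum]; exact hproc
    · rw [pvOfList_append_singleton_mem pre num hnum, hbases]
      apply pvRep_congr
      · intro c hc'
        have hcm : c ∈ pre := (PySem.Set.mem_ofList pre c).mp hc'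
        rw [pvP_append]
        by_cases hc1 : c = num + 1
        · have hcp : (c - 1) ∈ pre := by rw [hc1, show num + 1 - 1 = num from by omega]; exact hnum
          simp [pvP, hcp]
        · simp [hc1]
      · intro c _ _
        exact pvV_congr pre (pre ++ [num]) (fun y => (hiff y).symm) c
    · intro x hx
      have hx1 : (x + 1) ∉ pre := fun hh => hx (pvMemApp hh)
      rw [hpeaks x hx1]
      by_cases hxm : x ∈ pre
      · rw [if_pos (by simp [hxm]), if_pos (by simp [(hiff x).mpr hxm]),
          pvFall_congr pre (pre ++ [num]) (fun y => (hiff y).symm) x]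
      · rw [if_neg (by simp [hxm]), if_neg (by simp [List.mem_append]; exact ⟨hxm, fun hh => hxm (hh ▸ hnum)⟩)]
  · -- a new number
    have hc : processed.contains num = false := by
      rw [hproc, Bool.eq_false_iff]
      exact fun hh => hnum ((pvSetContains_iff pre num).mp hh)
    have hgm1 : peaks.get? (num - 1) =
        (if decide ((num - 1) ∈ pre) then some (pvFall pre (num - 1) pre.length) else none) := by
      have h' : num - 1 + 1 = num := by omega
      exact hpeaks (num - 1) (by rw [h']; exact hnum)
    have hP1 : pvP pre (num + 1) = true := by
      unfold pvP
      rw [show num + 1 - 1 = num from by omega]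
      simpa using hnum
    have hofl : PySem.Set.ofList (pre ++ [num]) = PySem.Set.ofList pre ++ [num] :=
      pvOfList_append_singleton pre num hnum
    have hproc' : (processed.add num) = PySem.Set.ofList (pre ++ [num]) := by
      rw [hofl, hproc]
      unfold PySem.Set.add
      rw [if_neg (fun hh => hnum ((pvSetContains_iff pre num).mp hh))]
    have hnumD : decide (num ∈ PySem.Set.ofList pre) = false := by
      simp only [decide_eq_false_iff_not, PySem.Set.mem_ofList]; exact hnum
    have hfreshnum : (decide (num ∈ PySem.Set.ofList pre) && pvP pre num) = false := by
      rw [hnumD]; rfl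
    have hg1 : bases.get? (num + 1) =
        (if (decide ((num + 1) ∈ PySem.Set.ofList pre) && pvP pre (num + 1))
         then some (pvV pre (num + 1)) else none) :=
      pvRep_get? bases _ _ _ (num + 1) hD hbases
    by_cases hm1 : (num - 1) ∈ pre <;> by_cases hp1 : (num + 1) ∈ pre
    · -- merge: num joins the run below (base b) and the run above (top P)
      have hDnb : pvDn pre (num - 1) (pvFall pre (num - 1) pre.length) :=
        pvDn_fall pre (num - 1) pre.length le_rfl
      set b := pvFall pre (num - 1) pre.length with hbdef
      have hbmem : b ∈ pre := pvDn_bot_mem hDnb hm1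
      have hble : b ≤ num - 1 := hDnb.1
      have hUpP : pvUp pre (num + 1) (pvV pre (num + 1)) := pvUp_climb pre (num + 1) pre.length le_rfl
      set P := pvV pre (num + 1) with hPdef
      have hPmem : P ∈ pre := pvUp_top_mem hUpP hp1
      have hPge : num + 1 ≤ P := hUpP.1
      have hkb : (decide (b ∈ PySem.Set.ofList pre) && pvP pre b) = true := by
        simp only [Bool.and_eq_true, decide_eq_true_eq, PySem.Set.mem_ofList]
        exact ⟨hbmem, by simp [pvP]; exact hDnb.2.2⟩
      have hb1 : (bases.insert b num).items =
          pvRep (PySem.Set.ofList pre) (pvP pre) (fun c => if c = b then num else pvV pre c) :=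
        pvRep_insert_mem bases _ _ _ b num hD hbases hkb
      have hq : (bases.insert b num).get? (num + 1) = some P := by
        rw [pvRep_get? (bases.insert b num) _ _ _ (num + 1) hD hb1,
          if_pos (by rw [Bool.and_eq_true]; exact ⟨by simpa using hp1, hP1⟩)]
        rw [if_neg (by omega)]
      have hpk : ((peaks.insert num b).erase (num - 1)).getD num 0 = b := by
        rw [PySem.Dict.getD_eq_get?_getD, pvGet?_erase, if_neg (by omega),
          PySem.Dict.get?_insert_self]
        rfl
      have hstep : pvAStep (bases, peaks, processed) num =
          ((((bases.insert b num).insert b P).erase (num + 1)),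
            ((peaks.insert num b).erase (num - 1)).insert P b, processed.add num) := by
        rw [if_pos (by simp [hm1])] at hgm1
        simp only [pvAStep, hc, Bool.false_eq_true, if_false, hgm1, hq, hpk]
      rw [hstep]
      have hb2 : (((bases.insert b num).insert b P)).items =
          pvRep (PySem.Set.ofList pre) (pvP pre)
            (fun c => if c = b then P else if c = b then num else pvV pre c) :=
        pvRep_insert_mem (bases.insert b num) _ _ _ b P hD hb1 hkb
      have hb3 : ((((bases.insert b num).insert b P)).erase (num + 1)).items =
          pvRep (PySem.Set.ofList pre) (fun c => pvP pre c && !(c == num + 1))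
            (fun c => if c = b then P else if c = b then num else pvV pre c) :=
        pvRep_erase _ _ _ _ (num + 1) hb2
      refine ⟨hproc', ?_, ?_⟩
      · rw [hofl, pvRep_append_singleton,
          if_neg (by unfold pvP; rw [decide_eq_true (pvMemApp hm1 : (num - 1) ∈ pre ++ [num])]; simp), List.append_nil, hb3]
        apply pvRep_congr
        · intro c _
          exact (pvP_append pre num c).symm
        · intro c hcD hpc
          rw [Bool.and_eq_true] at hpc
          have hcm : c ∈ pre := (PySem.Set.mem_ofList pre c).mp hcD
          have hcne : c ≠ num + 1 := by
            have := hpc.2; simp at this; exact this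
          have hcp : (c - 1) ∉ pre := by
            have := hpc.1; simp [pvP] at this; exact this
          by_cases hcb : c = b
          · subst hcb
            rw [if_pos rfl]
            exact (pvVb_join pre num hm1 hp1).symm
          · rw [if_neg hcb, if_neg hcb,
              ← pvV_extend pre num c hcm (pvV_ne_of_ne_fall pre num c hm1 hcm hcp hcb)]
      · intro x hx
        have hx1 : (x + 1) ∉ pre := fun hh => hx (pvMemApp hh)
        have hxm1 : x ≠ num - 1 := by
          intro hh; exact hx (by rw [hh, show num - 1 + 1 = num from by omega]; exact pvMemAppR)
        have hxn : x ≠ num := by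
          intro hh; subst hh; exact hx1 hp1
        by_cases hxP : x = P
        · subst hxP
          rw [PySem.Dict.get?_insert_self, if_pos (by simp [List.mem_append]; exact Or.inl hPmem)]
          exact congrArg some (pvFP_join' pre num hm1 hp1).symm
        · rw [PySem.Dict.get?_insert_of_ne _ _ hxP, pvGet?_erase, if_neg hxm1,
            PySem.Dict.get?_insert_of_ne _ _ hxn, hpeaks x hx1]
          by_cases hxm : x ∈ pre
          · rw [if_pos (by simp [hxm]), if_pos (by simp [List.mem_append]; exact Or.inl hxm),
              pvFall_extend pre num x hxm (pvFall_ne_of_ne_top pre num x hp1 hxm hx1 hxP)]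
          · rw [if_neg (by simp [hxm]), if_neg (by simp [List.mem_append]; exact ⟨hxm, hxn⟩)]
    · -- extend the run below: its base b keeps its slot, value becomes num
      have hDnb : pvDn pre (num - 1) (pvFall pre (num - 1) pre.length) :=
        pvDn_fall pre (num - 1) pre.length le_rfl
      set b := pvFall pre (num - 1) pre.length with hbdef
      have hbmem : b ∈ pre := pvDn_bot_mem hDnb hm1
      have hkb : (decide (b ∈ PySem.Set.ofList pre) && pvP pre b) = true := by
        simp only [Bool.and_eq_true, decide_eq_true_eq, PySem.Set.mem_ofList]
        exact ⟨hbmem, by simp [pvP]; exact hDnb.2.2⟩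
      have hb1 : (bases.insert b num).items =
          pvRep (PySem.Set.ofList pre) (pvP pre) (fun c => if c = b then num else pvV pre c) :=
        pvRep_insert_mem bases _ _ _ b num hD hbases hkb
      have hq : (bases.insert b num).get? (num + 1) = none := by
        rw [pvRep_get? (bases.insert b num) _ _ _ (num + 1) hD hb1,
          if_neg (by rw [Bool.and_eq_true]; rintro ⟨h1, -⟩; simp at h1; exact hp1 h1)]
      have hstep : pvAStep (bases, peaks, processed) num =
          (bases.insert b num, (peaks.insert num b).erase (num - 1), processed.add num) := by
        rw [if_pos (by simp [hm1])] at hgm1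
        simp only [pvAStep, hc, Bool.false_eq_true, if_false, hgm1, hq]
      rw [hstep]
      refine ⟨hproc', ?_, ?_⟩
      · rw [hofl, pvRep_append_singleton,
          if_neg (by unfold pvP; rw [decide_eq_true (pvMemApp hm1 : (num - 1) ∈ pre ++ [num])]; simp), List.append_nil, hb1]
        apply pvRep_congr
        · intro c hcD
          exact pvP_same pre num c ((PySem.Set.mem_ofList pre c).mp hcD) hp1
        · intro c hcD hpc
          have hcm : c ∈ pre := (PySem.Set.mem_ofList pre c).mp hcD
          have hcp : (c - 1) ∉ pre := by simp [pvP] at hpc; exact hpc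
          by_cases hcb : c = b
          · subst hcb
            rw [if_pos rfl]
            exact (pvVb_ext pre num hm1 hp1).symm
          · rw [if_neg hcb,
              ← pvV_extend pre num c hcm (pvV_ne_of_ne_fall pre num c hm1 hcm hcp hcb)]
      · intro x hx
        have hx1 : (x + 1) ∉ pre := fun hh => hx (pvMemApp hh)
        have hxm1 : x ≠ num - 1 := by
          intro hh; exact hx (by rw [hh, show num - 1 + 1 = num from by omega]; exact pvMemAppR)
        rw [pvGet?_erase, if_neg hxm1]
        by_cases hxn : x = num
        · rw [hxn, PySem.Dict.get?_insert_self, if_pos (by simp)]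
          exact congrArg some (pvFnum_ext pre num hm1).symm
        · rw [PySem.Dict.get?_insert_of_ne _ _ hxn, hpeaks x hx1]
          by_cases hxm : x ∈ pre
          · rw [if_pos (by simp [hxm]), if_pos (by simp [List.mem_append]; exact Or.inl hxm),
              pvFall_extend pre num x hxm (pvFall_ne_of_not_mem pre num x hp1 hxm)]
          · rw [if_neg (by simp [hxm]), if_neg (by simp [List.mem_append]; exact ⟨hxm, hxn⟩)]
    · -- extend the run above: num becomes the new base of that run
      have hUpP : pvUp pre (num + 1) (pvV pre (num + 1)) := pvUp_climb pre (num + 1) pre.length le_rfl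
      set P := pvV pre (num + 1) with hPdef
      have hPmem : P ∈ pre := pvUp_top_mem hUpP hp1
      have hPge : num + 1 ≤ P := hUpP.1
      have hstep : pvAStep (bases, peaks, processed) num =
          ((bases.insert num P).erase (num + 1), peaks.insert P num, processed.add num) := by
        rw [if_neg (by simp [hm1])] at hgm1
        rw [if_pos (by rw [Bool.and_eq_true]; exact ⟨by simpa using hp1, hP1⟩)] at hg1
        simp only [pvAStep, hc, Bool.false_eq_true, if_false, hgm1, hg1]
      rw [hstep]
      have hins : (bases.insert num P).items =
          pvRep (PySem.Set.ofList pre) (pvP pre) (pvV pre) ++ [(num, P)] :=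
        pvRep_insert_fresh bases _ _ _ num P hD hbases hfreshnum
      have hitems : ((bases.insert num P).erase (num + 1)).items =
          pvRep (PySem.Set.ofList pre) (fun c => pvP pre c && !(c == num + 1)) (pvV pre)
            ++ [(num, P)] := by
        rw [pvItems_erase, hins, List.filter_append, pvRep_filter_ne]
        congr 1
        rw [List.filter_cons_of_pos (by simp), List.filter_nil]
      refine ⟨hproc', ?_, ?_⟩
      · rw [hofl, pvRep_append_singleton,
          if_pos (by unfold pvP; rw [decide_eq_false (pvNotMemApp hm1 (by omega) : (num - 1) ∉ pre ++ [num])]; rfl), hitems]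
        congr 1
        · apply pvRep_congr
          · intro c _
            exact (pvP_append pre num c).symm
          · intro c hcD hpc
            rw [Bool.and_eq_true] at hpc
            have hcm : c ∈ pre := (PySem.Set.mem_ofList pre c).mp hcD
            rw [← pvV_extend pre num c hcm (pvV_ne_of_not_mem pre num c hm1 hcm)]
        · rw [pvVnum_join pre num hp1]
      · intro x hx
        have hx1 : (x + 1) ∉ pre := fun hh => hx (pvMemApp hh)
        have hxn : x ≠ num := by
          intro hh; subst hh; exact hx1 hp1
        by_cases hxP : x = P
        · subst hxP
          rw [PySem.Dict.get?_insert_self, if_pos (by simp [List.mem_append]; exact Or.inl hPmem)]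
          exact congrArg some (pvFP_join pre num hm1 hp1).symm
        · rw [PySem.Dict.get?_insert_of_ne _ _ hxP, hpeaks x hx1]
          by_cases hxm : x ∈ pre
          · rw [if_pos (by simp [hxm]), if_pos (by simp [List.mem_append]; exact Or.inl hxm),
              pvFall_extend pre num x hxm (pvFall_ne_of_ne_top pre num x hp1 hxm hx1 hxP)]
          · rw [if_neg (by simp [hxm]), if_neg (by simp [List.mem_append]; exact ⟨hxm, hxn⟩)]
    · -- isolated: num starts its own run
      have hstep : pvAStep (bases, peaks, processed) num =
          (bases.insert num num, peaks.insert num num, processed.add num) := by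
        rw [if_neg (by simp [hm1])] at hgm1
        rw [if_neg (by rw [Bool.and_eq_true]; rintro ⟨h1, -⟩; simp at h1; exact hp1 h1)] at hg1
        simp only [pvAStep, hc, Bool.false_eq_true, if_false, hgm1, hg1]
      rw [hstep]
      refine ⟨hproc', ?_, ?_⟩
      · rw [hofl, pvRep_append_singleton,
          if_pos (by unfold pvP; rw [decide_eq_false (pvNotMemApp hm1 (by omega) : (num - 1) ∉ pre ++ [num])]; rfl),
          pvRep_insert_fresh bases _ _ _ num num hD hbases hfreshnum]
        congr 1
        · apply pvRep_congr
          · intro c hcD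
            exact pvP_same pre num c ((PySem.Set.mem_ofList pre c).mp hcD) hp1
          · intro c hcD hpc
            have hcm : c ∈ pre := (PySem.Set.mem_ofList pre c).mp hcD
            rw [← pvV_extend pre num c hcm (pvV_ne_of_not_mem pre num c hm1 hcm)]
        · rw [pvVnum_new pre num hp1]
      · intro x hx
        have hx1 : (x + 1) ∉ pre := fun hh => hx (pvMemApp hh)
        by_cases hxn : x = num
        · rw [hxn, PySem.Dict.get?_insert_self, if_pos (by simp)]
          exact congrArg some (pvFnum_new pre num hm1).symm
        · rw [PySem.Dict.get?_insert_of_ne _ _ hxn, hpeaks x hx1]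
          by_cases hxm : x ∈ pre
          · rw [if_pos (by simp [hxm]), if_pos (by simp [List.mem_append]; exact Or.inl hxm),
              pvFall_extend pre num x hxm (pvFall_ne_of_not_mem pre num x hp1 hxm)]
          · rw [if_neg (by simp [hxm]), if_neg (by simp [List.mem_append]; exact ⟨hxm, hxn⟩)]


theorem pvA_run (l : List Int) : ∀ (pre : List Int) st, pvInv pre st →
    pvInv (pre ++ l) (l.foldl pvAStep st) := by
  induction l with
  | nil => intro pre st h; simpa using h
  | cons x l ih =>
    intro pre st h
    have := ih (pre ++ [x]) (pvAStep st x) (pvAStep_inv pre st x h)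
    simpa [List.append_assoc] using this

theorem pvBStep_inv (nums pre : List Int) (res : PySem.Dict Int Int) (num : Int)
    (h : pvBInv nums pre res) :
    pvBInv nums (pre ++ [num])
      (if (PySem.Set.ofList nums).contains (num - 1) || res.contains num then res
       else res.insert num (pvClimb (PySem.Set.ofList nums) num (PySem.Set.ofList nums).length)) := by
  unfold pvBInv at h ⊢
  have hD := PySem.Set.nodup_ofList pre
  by_cases hm : num ∈ pre
  · -- duplicate: the result dict cannot change and ofList pre absorbs num
    rw [pvOfList_append_singleton_mem pre num hm]
    split
    · exact h
    · rename_i hcond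
      exfalso
      apply hcond
      rw [Bool.or_eq_true]
      by_cases hskip : (num - 1) ∈ nums
      · exact Or.inl ((pvSetContains_iff nums (num - 1)).mpr hskip)
      · right
        rw [pvRep_contains res _ _ _ num hD h]
        simp only [Bool.and_eq_true, decide_eq_true_eq]
        exact ⟨by simpa using (PySem.Set.mem_ofList pre num).mpr hm, by simp [pvP, hskip]⟩
  · rw [pvOfList_append_singleton pre num hm, pvRep_append_singleton]
    by_cases hskip : (num - 1) ∈ nums
    · -- not a run start: nothing is added on either side
      rw [if_pos (by rw [Bool.or_eq_true]; exact Or.inl ((pvSetContains_iff nums (num - 1)).mpr hskip))]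
      rw [if_neg (by simp [pvP, hskip])]
      simpa using h
    · -- a fresh run start: both sides append (num, top of num's run)
      have hcont : res.contains num = false := by
        rw [pvRep_contains res _ _ _ num hD h]
        simp only [Bool.and_eq_false_iff]
        left
        simpa using fun hx => hm ((PySem.Set.mem_ofList pre num).mp hx)
      rw [if_neg (by simp [hcont, hskip]), if_pos (by simp [pvP, hskip])]
      rw [pvRep_insert_fresh res _ _ _ num _ hD h
        (by rw [Bool.and_eq_false_iff]; left; simpa using fun hx => hm ((PySem.Set.mem_ofList pre num).mp hx))]

theorem pvB_run (nums : List Int) (l : List Int) : ∀ (pre : List Int) res, pvBInv nums pre res →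
    pvBInv nums (pre ++ l)
      (l.foldl (fun res num =>
        if (PySem.Set.ofList nums).contains (num - 1) || res.contains num then res
        else res.insert num (pvClimb (PySem.Set.ofList nums) num (PySem.Set.ofList nums).length)) res) := by
  induction l with
  | nil => intro pre res h; simpa using h
  | cons x l ih =>
    intro pre res h
    have := ih (pre ++ [x]) _ (pvBStep_inv nums pre res x h)
    simpa [List.append_assoc] using this

-- ===== VERDICT (by name: the statement is the Claim_ definition above) =====
theorem get_consecutive_subsequences_spec : Claim_equal_get_consecutive_subsequences := by
  intro nums _
  unfold Spec_get_consecutive_subsequences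
  have hA := pvA_run nums [] (PySem.Dict.empty, PySem.Dict.empty, PySem.Set.empty)
    (by
      refine ⟨rfl, ?_, ?_⟩
      · simp [pvRep, PySem.Set.ofList]
        rfl
      · intro x _
        simp [PySem.Dict.get?_empty])
  simp only [List.nil_append] at hA
  have hB := pvB_run nums nums [] PySem.Dict.empty (by simp [pvBInv, pvRep, PySem.Set.ofList]; rfl)
  simp only [List.nil_append] at hB
  unfold get_consecutive_subsequences get_consecutive_subsequences_alt
  rw [hA.2.1, hB]
  apply pvRep_congr
  · intro c _; rfl
  · intro c hc _
    have h1 : pvUp nums c (pvV nums c) := pvUp_climb nums c nums.length le_rfl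
    have h2 : pvUp (PySem.Set.ofList nums) c
        (pvClimb (PySem.Set.ofList nums) c (PySem.Set.ofList nums).length) :=
      pvUp_climb _ c _ le_rfl
    have h1' : pvUp (PySem.Set.ofList nums) c (pvV nums c) :=
      pvUp_transfer (fun y hy => (PySem.Set.mem_ofList nums y).mpr hy)
        (fun hy => h1.2.2 ((PySem.Set.mem_ofList nums _).mp hy)) h1
    exact pvUp_unique h1' h2
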